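-- pv_equiv track=rewrite | github.com/thaingern001/SignalProject2024 | model3.py | identify_chord
-- ===== SOURCE A (Python) =====
-- from itertools import permutations
--
-- note_to_num = {'C': 0, 'C#': 1, 'D': 2, 'D#': 3, 'E': 4, 'F': 5,
--                'F#': 6, 'G': 7, 'G#': 8, 'A': 9, 'A#': 10, 'B': 11}
--
-- num_to_note = {v: k for k, v in note_to_num.items()}
--
-- chords = {
--     "": [0, 4, 7],  # Major
--     "m": [0, 3, 7]   # Minor
-- }
--
-- def identify_chord(notes):
--     if not notes:
--         return "No chord detected"
--     nums = [note_to_num[n] for n in notes if n in note_to_num]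
--     if not nums:
--         return "No valid note detected"
--     for perm in permutations(nums):
--         if not perm:  # หรือไม่จำเป็นในกรณีนี้
--             continue
--         root = perm[0]
--         intervals = [(n - root) % 12 for n in perm]
--         for chord_name, pattern in chords.items():
--             if intervals == pattern:
--                 return f"{num_to_note[root]}{chord_name}"
--     return "Unknown Chord"
-- ===== SOURCE B (Python) =====
-- note_to_num = {'C': 0, 'C#': 1, 'D': 2, 'D#': 3, 'E': 4, 'F': 5,
--                'F#': 6, 'G': 7, 'G#': 8, 'A': 9, 'A#': 10, 'B': 11}
--
-- num_to_note = {v: k for k, v in note_to_num.items()}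
--
--
-- def identify_chord(notes):
--     if not notes:
--         return "No chord detected"
--     nums = [note_to_num[n] for n in notes if n in note_to_num]
--     if not nums:
--         return "No valid note detected"
--     # Only a 3-note set can match a 3-interval pattern: try each note as root.
--     if len(nums) == 3:
--         for r in nums:
--             iv = [(n - r) % 12 for n in nums]
--             if all(t in iv for t in (0, 4, 7)):
--                 return num_to_note[r]
--             if all(t in iv for t in (0, 3, 7)):
--                 return num_to_note[r] + "m"
--     return "Unknown Chord"
-- ===== Notes on version B (the rewrite author's own statement) =====
-- stated objective: alternative
-- what changed: A enumerates permutations of the recognised notes and compares each interval list against the chord patterns; B short-circuits unless exactly 3 notes were recognised and then tries each note once as the root, testing pattern membership directly.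
import Mathlib
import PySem

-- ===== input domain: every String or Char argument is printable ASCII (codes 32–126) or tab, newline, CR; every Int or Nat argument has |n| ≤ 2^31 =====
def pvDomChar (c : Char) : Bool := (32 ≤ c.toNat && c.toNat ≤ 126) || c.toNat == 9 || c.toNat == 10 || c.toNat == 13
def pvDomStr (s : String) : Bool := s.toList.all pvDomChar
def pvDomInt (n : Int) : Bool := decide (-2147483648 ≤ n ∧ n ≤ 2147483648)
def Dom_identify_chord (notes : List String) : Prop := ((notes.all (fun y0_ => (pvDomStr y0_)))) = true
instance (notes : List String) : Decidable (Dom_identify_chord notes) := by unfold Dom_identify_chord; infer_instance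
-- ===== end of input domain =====

-- ===== PORT A =====
-- B replaces A's scan over all permutations of the notes by a single pass that
-- tries each note once as the root against the fixed interval patterns.

-- module constants (shared by A and B, as in the Python module)
def noteToNum : PySem.Dict String Int :=
  PySem.Dict.ofList [("C", 0), ("C#", 1), ("D", 2), ("D#", 3), ("E", 4), ("F", 5),
                     ("F#", 6), ("G", 7), ("G#", 8), ("A", 9), ("A#", 10), ("B", 11)]

def numToNote : PySem.Dict Int String :=
  PySem.Dict.ofList (noteToNum.items.map (fun p => (p.2, p.1)))

-- f"{num_to_note[root]}..." : root always comes from note_to_num's values, so the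
-- lookup never misses; the getD "" default is unreachable.
def noteName (r : Int) : String := (numToNote.get? r).getD ""

def chordsList : List (String × List Int) := [("", [0, 4, 7]), ("m", [0, 3, 7])]

-- inner 'for chord_name, pattern in chords.items()' with early return
def chordOf (root : Int) (intervals : List Int) : List (String × List Int) → Option String
  | [] => none
  | (name, pattern) :: rest =>
      if intervals = pattern then some (noteName root ++ name)
      else chordOf root intervals rest

-- outer 'for perm in permutations(nums)' with early return
def scanPerms : List (List Int) → Option String
  | [] => none
  | perm :: rest =>
      match perm with
      | [] => scanPerms rest  -- 'if not perm: continue'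
      | root :: _ =>
          match chordOf root (perm.map (fun n => PySem.Int.mod (n - root) 12)) chordsList with
          | some s => some s
          | none => scanPerms rest

def identify_chord (notes : List String) : String :=
  if notes = [] then "No chord detected"
  else
    let nums := notes.filterMap (fun n => noteToNum.get? n)
    if nums = [] then "No valid note detected"
    else
      match scanPerms (PySem.List.permutations nums nums.length) with
      | some s => s
      | none => "Unknown Chord"

-- ===== PORT B =====
-- 'for r in nums' with the two pattern-membership tests, early return
def scanRoots (nums : List Int) : List Int → Option String
  | [] => none
  | r :: rest =>
      let iv := nums.map (fun n => PySem.Int.mod (n - r) 12)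
      if ([0, 4, 7] : List Int).all (fun t => iv.contains t) then some (noteName r)
      else if ([0, 3, 7] : List Int).all (fun t => iv.contains t) then some (noteName r ++ "m")
      else scanRoots nums rest

def identify_chord_alt (notes : List String) : String :=
  if notes = [] then "No chord detected"
  else
    let nums := notes.filterMap (fun n => noteToNum.get? n)
    if nums = [] then "No valid note detected"
    else if nums.length = 3 then
      match scanRoots nums nums with
      | some s => s
      | none => "Unknown Chord"
    else "Unknown Chord"

-- ===== PRECONDITION & SPEC =====
def Spec_identify_chord (notes : List String) (out : String) : Prop := out = identify_chord_alt notes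
instance (notes : List String) (out : String) : Decidable (Spec_identify_chord notes out) := by unfold Spec_identify_chord; infer_instance

-- ===== CLAIM (what is proved, stated in full; the proofs are below) =====
def Claim_equal_identify_chord : Prop := ∀ (notes : List String), Dom_identify_chord notes → Spec_identify_chord notes (identify_chord notes)

-- ===== LEMMAS AND PROOFS =====

-- every tuple produced by permutations(xs, r) has length r
lemma perm_length : ∀ (r : Nat) (xs : List Int) (p : List Int),
    p ∈ PySem.List.permutations xs r → p.length = r := by
  intro r
  induction r with
  | zero => intro xs p hp; simp [PySem.List.permutations] at hp; simp [hp]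
  | succ n ih =>
      intro xs p hp
      simp only [PySem.List.permutations, List.mem_flatMap, List.mem_range] at hp
      obtain ⟨i, _, hp⟩ := hp
      rcases h : xs[i]? with _ | v <;> rw [h] at hp
      · simp at hp
      · simp only [List.mem_map] at hp
        obtain ⟨q, hq, rfl⟩ := hp
        simp [ih _ _ hq]

lemma chordOf_none (root : Int) (iv : List Int) (h : iv.length ≠ 3) :
    chordOf root iv chordsList = none := by
  simp only [chordsList, chordOf]
  rw [if_neg, if_neg] <;> rintro rfl <;> simp at h

lemma scanPerms_none (n : Nat) (hn : n ≠ 3) :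
    ∀ (ps : List (List Int)), (∀ p ∈ ps, p.length = n) → scanPerms ps = none := by
  intro ps
  induction ps with
  | nil => intro _; simp [scanPerms]
  | cons p rest ih =>
      intro h
      rcases p with _ | ⟨root, tl⟩
      · simpa [scanPerms] using ih (fun q hq => h q (by simp [hq]))
      · have hlen : ((root :: tl).map (fun n => PySem.Int.mod (n - root) 12)).length ≠ 3 := by
          rw [List.length_map, h (root :: tl) (by simp)]; exact hn
        simp only [scanPerms, chordOf_none _ _ hlen]
        exact ih (fun q hq => h q (by simp [hq]))

-- one root's pair of permutations in A equals one root's test in B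
-- (three variants: the root sits at position 0 / 1 / 2 of B's interval list)
lemma root_block1 (r p q : Int) (k : Option String) :
    (match chordOf r [0, PySem.Int.mod (p - r) 12, PySem.Int.mod (q - r) 12] chordsList with
     | some s => some s
     | none =>
       match chordOf r [0, PySem.Int.mod (q - r) 12, PySem.Int.mod (p - r) 12] chordsList with
       | some s => some s
       | none => k)
    = (if ([0, 4, 7] : List Int).all
            (fun t => ([0, PySem.Int.mod (p - r) 12, PySem.Int.mod (q - r) 12] : List Int).contains t)
       then some (noteName r)
       else if ([0, 3, 7] : List Int).all
            (fun t => ([0, PySem.Int.mod (p - r) 12, PySem.Int.mod (q - r) 12] : List Int).contains t)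
       then some (noteName r ++ "m")
       else k) := by
  generalize PySem.Int.mod (p - r) 12 = x
  generalize PySem.Int.mod (q - r) 12 = y
  simp only [chordOf, chordsList, List.all_cons, List.all_nil, List.contains_cons,
    List.contains_nil, List.cons.injEq, beq_iff_eq, Bool.or_false, Bool.and_true,
    Bool.and_eq_true, Bool.or_eq_true, and_true, true_and]
  split_ifs <;> first | rfl | (exfalso; omega) | simp_all

lemma root_block2 (r p q : Int) (k : Option String) :
    (match chordOf r [0, PySem.Int.mod (p - r) 12, PySem.Int.mod (q - r) 12] chordsList with
     | some s => some s
     | none =>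
       match chordOf r [0, PySem.Int.mod (q - r) 12, PySem.Int.mod (p - r) 12] chordsList with
       | some s => some s
       | none => k)
    = (if ([0, 4, 7] : List Int).all
            (fun t => ([PySem.Int.mod (p - r) 12, 0, PySem.Int.mod (q - r) 12] : List Int).contains t)
       then some (noteName r)
       else if ([0, 3, 7] : List Int).all
            (fun t => ([PySem.Int.mod (p - r) 12, 0, PySem.Int.mod (q - r) 12] : List Int).contains t)
       then some (noteName r ++ "m")
       else k) := by
  generalize PySem.Int.mod (p - r) 12 = x
  generalize PySem.Int.mod (q - r) 12 = y
  simp only [chordOf, chordsList, List.all_cons, List.all_nil, List.contains_cons,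
    List.contains_nil, List.cons.injEq, beq_iff_eq, Bool.or_false, Bool.and_true,
    Bool.and_eq_true, Bool.or_eq_true, and_true, true_and]
  split_ifs <;> first | rfl | (exfalso; omega) | simp_all

lemma root_block3 (r p q : Int) (k : Option String) :
    (match chordOf r [0, PySem.Int.mod (p - r) 12, PySem.Int.mod (q - r) 12] chordsList with
     | some s => some s
     | none =>
       match chordOf r [0, PySem.Int.mod (q - r) 12, PySem.Int.mod (p - r) 12] chordsList with
       | some s => some s
       | none => k)
    = (if ([0, 4, 7] : List Int).all
            (fun t => ([PySem.Int.mod (p - r) 12, PySem.Int.mod (q - r) 12, 0] : List Int).contains t)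
       then some (noteName r)
       else if ([0, 3, 7] : List Int).all
            (fun t => ([PySem.Int.mod (p - r) 12, PySem.Int.mod (q - r) 12, 0] : List Int).contains t)
       then some (noteName r ++ "m")
       else k) := by
  generalize PySem.Int.mod (p - r) 12 = x
  generalize PySem.Int.mod (q - r) 12 = y
  simp only [chordOf, chordsList, List.all_cons, List.all_nil, List.contains_cons,
    List.contains_nil, List.cons.injEq, beq_iff_eq, Bool.or_false, Bool.and_true,
    Bool.and_eq_true, Bool.or_eq_true, and_true, true_and]
  split_ifs <;> first | rfl | (exfalso; omega) | simp_all

-- the 3-note case: A's permutation scan equals B's root scan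
lemma scan3 (a b c : Int) :
    scanPerms (PySem.List.permutations [a, b, c] 3) = scanRoots [a, b, c] [a, b, c] := by
  have hperm : PySem.List.permutations [a, b, c] 3 =
      [[a,b,c],[a,c,b],[b,a,c],[b,c,a],[c,a,b],[c,b,a]] := rfl
  rw [hperm]
  simp only [scanPerms, scanRoots, List.map_cons, List.map_nil, sub_self]
  have h0 : PySem.Int.mod 0 12 = 0 := by simp [PySem.Int.mod]
  rw [h0]
  rw [root_block1 a b c, root_block2 b a c, root_block3 c a b]

-- the whole computation after 'nums' has been built and found non-empty
lemma key (nums : List Int) :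
    (if nums = [] then "No valid note detected"
     else match scanPerms (PySem.List.permutations nums nums.length) with
          | some s => s
          | none => "Unknown Chord")
    = (if nums = [] then "No valid note detected"
       else if nums.length = 3 then
         match scanRoots nums nums with
         | some s => s
         | none => "Unknown Chord"
       else "Unknown Chord") := by
  by_cases hz : nums = []
  · simp [hz]
  · simp only [if_neg hz]
    by_cases h3 : nums.length = 3
    · obtain ⟨a, b, c, rfl⟩ := List.length_eq_three.mp h3
      rw [if_pos h3, show ([a,b,c] : List Int).length = 3 from rfl, scan3 a b c]
    · rw [if_neg h3,
        scanPerms_none nums.length h3 _ (fun p hp => perm_length nums.length nums p hp)]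

theorem identify_chord_equal (notes : List String) :
    identify_chord notes = identify_chord_alt notes := by
  unfold identify_chord identify_chord_alt
  by_cases hn : notes = []
  · simp [hn]
  · simp only [if_neg hn]
    exact key (notes.filterMap (fun n => noteToNum.get? n))

-- ===== VERDICT (by name: the statement is the Claim_ definition above) =====
theorem identify_chord_spec : Claim_equal_identify_chord := by
  intro notes _
  exact identify_chord_equal notes
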